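-- pv_equiv track=rewrite | github.com/Rachitjain24/Ved-World-Numerology-Codes | Combine.py | lnum_generator
-- ===== SOURCE A (Python) =====
-- def lnum_generator(string) :
--     length = len(string)
--     sum = 0
--     for i in range(length) :
--         if string[i].isdigit() :
--             sum = sum + int(string[i])
--             if sum >= 10 :
--                 num = sum - 10
--                 sum = num + 1
--     return sum
-- ===== SOURCE B (Python) =====
-- def lnum_generator(string):
--     total = sum(int(c) for c in string if c.isdigit())
--     return 0 if total == 0 else 1 + (total - 1) % 9
-- ===== Notes on version B (the rewrite author's own statement) =====
-- stated objective: simpler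
-- what changed: Replaces A's interleaved subtract-9 reduction inside the scanning loop by a plain digit sum followed by the closed-form digital root 1 + (total - 1) % 9 (0 when there are no nonzero digits).
import Mathlib
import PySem

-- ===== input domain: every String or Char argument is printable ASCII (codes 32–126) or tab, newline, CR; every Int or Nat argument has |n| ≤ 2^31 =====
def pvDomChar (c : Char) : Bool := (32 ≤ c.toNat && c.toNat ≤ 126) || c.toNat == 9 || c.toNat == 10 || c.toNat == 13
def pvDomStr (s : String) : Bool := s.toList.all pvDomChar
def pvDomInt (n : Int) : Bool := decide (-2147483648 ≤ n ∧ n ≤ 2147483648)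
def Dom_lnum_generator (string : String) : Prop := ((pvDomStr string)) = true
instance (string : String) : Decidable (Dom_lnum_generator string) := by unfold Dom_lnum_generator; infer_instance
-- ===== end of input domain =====

-- B replaces A's interleaved subtract-9 reduction with a plain digit sum and a closed-form digital root (simpler).

-- int(c) for a single character c guarded by c.isdigit() (always succeeds on ASCII digits; default unreachable there)
def pyDigitVal (c : Char) : Int := (PySem.Int.ofChars? [c]).getD 0

-- ===== PORT A =====
def lnum_generator (string : String) : Int :=
  let length : Int := PySem.Str.len string
  (PySem.List.pyRange 0 length 1).foldl
    (fun sum i =>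
      -- string[i]: i comes from range(length) so it is always in range; default unreachable
      let c := PySem.List.pyGetD string.toList i ' '
      if PySem.Chars.isdigit c then
        let sum := sum + pyDigitVal c
        if 10 ≤ sum then
          let num := sum - 10
          num + 1
        else sum
      else sum) 0

-- ===== PORT B =====
def lnum_generator_alt (string : String) : Int :=
  let total : Int := string.toList.foldl
    (fun t c => if PySem.Chars.isdigit c then t + pyDigitVal c else t) 0
  if total = 0 then 0 else 1 + PySem.Int.mod (total - 1) 9

-- ===== PRECONDITION & SPEC =====
def Spec_lnum_generator (string : String) (out : Int) : Prop := out = lnum_generator_alt string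
instance (string : String) (out : Int) : Decidable (Spec_lnum_generator string out) := by unfold Spec_lnum_generator; infer_instance

-- ===== CLAIM (what is proved, stated in full; the proofs are below) =====
def Claim_equal_lnum_generator : Prop := ∀ (string : String), Dom_lnum_generator string → Spec_lnum_generator string (lnum_generator string)

-- ===== LEMMAS AND PROOFS =====

-- A's loop body as a function of the current character
def pvStepA (s : Int) (c : Char) : Int :=
  if PySem.Chars.isdigit c then
    if 10 ≤ s + pyDigitVal c then s + pyDigitVal c - 10 + 1 else s + pyDigitVal c
  else s

-- contribution of one character to the digit sum
def pvG (c : Char) : Int := if PySem.Chars.isdigit c then pyDigitVal c else 0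

-- digital root with Python's "0 only for 0" convention
def pvDr (t : Int) : Int := if t = 0 then 0 else 1 + (t - 1) % 9

theorem pyDigitVal_bound (c : Char) (h : PySem.Chars.isdigit c = true) :
    0 ≤ pyDigitVal c ∧ pyDigitVal c ≤ 9 := by
  simp only [PySem.Chars.isdigit, Bool.and_eq_true, decide_eq_true_eq, Char.le_def] at h
  obtain ⟨h1, h2⟩ := h
  have hb : 48 ≤ c.toNat ∧ c.toNat ≤ 57 := by
    rw [show ('0' : Char).val = 48 from by decide] at h1
    rw [show ('9' : Char).val = 57 from by decide] at h2
    exact ⟨UInt32.le_iff_toNat_le.mp h1, UInt32.le_iff_toNat_le.mp h2⟩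
  have hn : c.toNat = 48 ∨ c.toNat = 49 ∨ c.toNat = 50 ∨ c.toNat = 51 ∨ c.toNat = 52 ∨
      c.toNat = 53 ∨ c.toNat = 54 ∨ c.toNat = 55 ∨ c.toNat = 56 ∨ c.toNat = 57 := by omega
  have e : ∀ (d : Char), c.toNat = d.toNat → c = d :=
    fun d hd => Char.ext (UInt32.toNat_inj.mp hd)
  rcases hn with h|h|h|h|h|h|h|h|h|h
  exacts [by rw [e '0' h]; decide, by rw [e '1' h]; decide, by rw [e '2' h]; decide,
          by rw [e '3' h]; decide, by rw [e '4' h]; decide, by rw [e '5' h]; decide,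
          by rw [e '6' h]; decide, by rw [e '7' h]; decide, by rw [e '8' h]; decide,
          by rw [e '9' h]; decide]

theorem pvG_bound (c : Char) : 0 ≤ pvG c ∧ pvG c ≤ 9 := by
  unfold pvG
  by_cases h : PySem.Chars.isdigit c = true
  · simp [h]; exact pyDigitVal_bound c h
  · simp [h]

theorem pvS_nonneg (cs : List Char) : 0 ≤ (cs.map pvG).sum := by
  induction cs with
  | nil => simp
  | cons c cs ih => have := pvG_bound c; simp only [List.map_cons, List.sum_cons]; omega

-- A's port is A's loop body folded over the characters
theorem A_eq_foldl (s : String) : lnum_generator s = s.toList.foldl pvStepA 0 := by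
  unfold lnum_generator
  rw [PySem.Str.len_eq]
  exact PySem.List.foldl_pyRange_zero_pyGetD' s.toList ' ' pvStepA 0

-- the main invariant: from any accumulator in [0,9], A's loop lands on the digital root
theorem main_inv (cs : List Char) : ∀ acc : Int, 0 ≤ acc → acc ≤ 9 →
    cs.foldl pvStepA acc = pvDr (acc + (cs.map pvG).sum) := by
  induction cs with
  | nil =>
    intro acc h0 h9
    simp only [List.foldl_nil, List.map_nil, List.sum_nil, add_zero, pvDr]
    by_cases h : acc = 0
    · simp [h]
    · rw [if_neg h, Int.emod_eq_of_lt (by omega) (by omega)]; omega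
  | cons c cs ih =>
    intro acc h0 h9
    have hS := pvS_nonneg cs
    simp only [List.foldl_cons, List.map_cons, List.sum_cons]
    by_cases hd : PySem.Chars.isdigit c = true
    · have hb := pyDigitVal_bound c hd
      have hg : pvG c = pyDigitVal c := by simp [pvG, hd]
      by_cases hten : 10 ≤ acc + pyDigitVal c
      · have hstep : pvStepA acc c = acc + pyDigitVal c - 9 := by
          simp [pvStepA, hd, hten]; ring
        rw [hstep, ih _ (by omega) (by omega)]
        unfold pvDr
        rw [if_neg (by omega), if_neg (by omega)]
        have h1 : acc + pyDigitVal c - 9 + (cs.map pvG).sum - 1 =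
            (acc + (pvG c + (cs.map pvG).sum)) - 1 - 9 := by rw [hg]; ring
        rw [h1, Int.sub_emod_right]
      · have hstep : pvStepA acc c = acc + pyDigitVal c := by simp [pvStepA, hd, hten]
        rw [hstep, ih _ (by omega) (by omega), hg]
        congr 1; ring
    · have hstep : pvStepA acc c = acc := by simp [pvStepA, hd]
      have hg : pvG c = 0 := by simp [pvG, hd]
      rw [hstep, ih _ h0 h9, hg]
      congr 1; ring

-- B's running total is the digit sum
theorem B_total (cs : List Char) : ∀ acc : Int,
    cs.foldl (fun t c => if PySem.Chars.isdigit c then t + pyDigitVal c else t) acc =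
      acc + (cs.map pvG).sum := by
  induction cs with
  | nil => intro acc; simp
  | cons c cs ih =>
    intro acc
    simp only [List.foldl_cons, List.map_cons, List.sum_cons]
    by_cases hd : PySem.Chars.isdigit c = true
    · rw [if_pos hd, ih]; simp [pvG, hd]; ring
    · rw [if_neg hd, ih]; simp [pvG, hd]

-- B's port computes the digital root of the digit sum
theorem B_eq_dr (s : String) : lnum_generator_alt s = pvDr ((s.toList.map pvG).sum) := by
  unfold lnum_generator_alt pvDr
  rw [B_total]
  simp only [zero_add]
  by_cases h : (s.toList.map pvG).sum = 0
  · simp [h]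
  · rw [if_neg h, if_neg h]
    congr 1
    simp [PySem.Int.mod, Int.fmod_eq_emod]

-- ===== VERDICT (by name: the statement is the Claim_ definition above) =====
theorem lnum_generator_spec : Claim_equal_lnum_generator := by
  intro string _
  unfold Spec_lnum_generator
  rw [A_eq_foldl, B_eq_dr, main_inv string.toList 0 le_rfl (by norm_num), zero_add]
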